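-- pv_equiv track=rewrite | github.com/markround/nkp-cluster-cleaner | src/redis_data_collector.py | _group_by_owner
-- ===== SOURCE A (Python) =====
-- from typing import Dict, List, Optional, Any
-- from collections import defaultdict, Counter
--
-- def _group_by_owner(all_clusters: List[tuple]) -> Dict[str, Dict[str, int]]:
--     """
--     Group clusters by owner with counts by status.
--
--     Args:
--         all_clusters: List of (cluster_info, reason, status) tuples
--
--     Returns:
--         Dictionary with owner as key and status counts as values
--     """
--     owner_data = defaultdict(lambda: {'deletion': 0, 'excluded': 0, 'total': 0})
--
--     for cluster_info, reason, status in all_clusters: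
--         labels = cluster_info.get('labels', {})
--         owner = labels.get('owner', 'no-owner')
--         owner_data[owner][status] += 1
--         owner_data[owner]['total'] += 1
--
--     return dict(owner_data)
-- ===== SOURCE B (Python) =====
-- from typing import Dict, List
--
--
-- def _group_by_owner(all_clusters: List[tuple]) -> Dict[str, Dict[str, int]]:
--     """Two-pass version: first group statuses by owner, then count each group."""
--     groups: Dict[str, List[str]] = {}
--     for cluster_info, _reason, status in all_clusters:
--         owner = cluster_info.get('labels', {}).get('owner', 'no-owner')
--         groups.setdefault(owner, []).append(status)
--
--     result: Dict[str, Dict[str, int]] = {}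
--     for owner, statuses in groups.items():
--         counts = {'deletion': 0, 'excluded': 0, 'total': 0}
--         for s in statuses:
--             counts[s] += 1
--             counts['total'] += 1
--         result[owner] = counts
--     return result
-- ===== Notes on version B (the rewrite author's own statement) =====
-- stated objective: alternative
-- what changed: Replaces A's single pass that updates a nested per-owner counter dict in place with two differently-shaped passes: a grouping pass building owner -> list of statuses, then an aggregation pass that counts each owner's status list into a fresh {'deletion','excluded','total'} dict.
import Mathlib
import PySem

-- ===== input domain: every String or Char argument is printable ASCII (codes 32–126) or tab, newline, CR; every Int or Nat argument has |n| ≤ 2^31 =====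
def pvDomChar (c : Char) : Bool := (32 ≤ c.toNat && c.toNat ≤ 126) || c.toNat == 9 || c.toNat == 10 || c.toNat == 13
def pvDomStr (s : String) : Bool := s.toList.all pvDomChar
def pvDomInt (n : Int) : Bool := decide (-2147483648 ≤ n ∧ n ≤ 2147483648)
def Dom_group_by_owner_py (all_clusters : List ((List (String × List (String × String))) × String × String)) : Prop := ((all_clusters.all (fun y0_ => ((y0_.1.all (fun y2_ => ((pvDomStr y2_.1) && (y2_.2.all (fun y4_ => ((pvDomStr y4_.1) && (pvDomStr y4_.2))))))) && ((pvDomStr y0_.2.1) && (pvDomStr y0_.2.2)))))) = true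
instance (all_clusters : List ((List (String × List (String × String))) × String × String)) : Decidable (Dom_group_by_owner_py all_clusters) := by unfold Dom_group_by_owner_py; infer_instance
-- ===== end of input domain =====

-- B re-groups first (owner -> list of statuses) and counts each group afterwards, instead of
-- A's single pass over a nested defaultdict counter; same return value, no speed claim.

-- labels = cluster_info.get('labels', {}); owner = labels.get('owner', 'no-owner')
-- (shared by both Pythons verbatim)
def pvOwnerOf (cluster_info : List (String × List (String × String))) : String :=
  (PySem.Dict.mk ((PySem.Dict.mk cluster_info).getD "labels" [])).getD "owner" "no-owner"

-- {'deletion': 0, 'excluded': 0, 'total': 0} (A's defaultdict default / B's fresh counts dict)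
def pvBase : PySem.Dict String Int :=
  PySem.Dict.mk [("deletion", 0), ("excluded", 0), ("total", 0)]

-- ===== PORT A =====
-- one pass: owner_data[owner][status] += 1; owner_data[owner]['total'] += 1
-- (d[k] += 1 is ported as insert k (getD k 0 + 1); inside Pre_ the key is already present,
--  exactly where Python does not raise KeyError)
def group_by_owner_py (all_clusters : List ((List (String × List (String × String))) × String × String)) : List (String × List (String × Int)) :=
  let owner_data :=
    all_clusters.foldl (fun od c =>
      let owner := pvOwnerOf c.1
      let cur := od.getD owner pvBase
      let cur := cur.insert c.2.2 (cur.getD c.2.2 0 + 1)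
      let cur := cur.insert "total" (cur.getD "total" 0 + 1)
      od.insert owner cur) PySem.Dict.empty
  owner_data.items.map (fun p => (p.1, p.2.items))

-- ===== PORT B =====
-- counts[s] += 1; counts['total'] += 1  (one status folded into a counts dict)
def pvBump (d : PySem.Dict String Int) (s : String) : PySem.Dict String Int :=
  let d := d.insert s (d.getD s 0 + 1)
  d.insert "total" (d.getD "total" 0 + 1)

-- the inner counting loop of B's second pass over one owner's status list
def pvCounts (statuses : List String) : PySem.Dict String Int :=
  statuses.foldl pvBump pvBase

def group_by_owner_py_alt (all_clusters : List ((List (String × List (String × String))) × String × String)) : List (String × List (String × Int)) :=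
  -- pass 1: groups.setdefault(owner, []).append(status)
  let groups : PySem.Dict String (List String) :=
    all_clusters.foldl (fun g c => g.modify (pvOwnerOf c.1) [] (· ++ [c.2.2])) PySem.Dict.empty
  -- pass 2: result[owner] = counts(statuses)
  let result :=
    groups.items.foldl (fun r p => r.insert p.1 (pvCounts p.2)) PySem.Dict.empty
  result.items.map (fun p => (p.1, p.2.items))

-- ===== PRECONDITION & SPEC =====
-- Pre_ holds exactly when every status is one of the three counter keys: on any other status
-- Python A raises KeyError at owner_data[owner][status] += 1 (and B raises there too).
def Pre_group_by_owner_py (all_clusters : List ((List (String × List (String × String))) × String × String)) : Prop :=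
  ∀ c ∈ all_clusters, c.2.2 = "deletion" ∨ c.2.2 = "excluded" ∨ c.2.2 = "total"
instance (all_clusters : List ((List (String × List (String × String))) × String × String)) : Decidable (Pre_group_by_owner_py all_clusters) := by unfold Pre_group_by_owner_py; infer_instance

def pvWitness_group_by_owner_py : (List ((List (String × List (String × String))) × String × String)) :=
  [([("labels", [("owner", "alice")])], "expired", "deletion"),
   ([], "protected", "excluded")]

def Spec_group_by_owner_py (all_clusters : List ((List (String × List (String × String))) × String × String)) (out : List (String × List (String × Int))) : Prop := out = group_by_owner_py_alt all_clusters
instance (all_clusters : List ((List (String × List (String × String))) × String × String)) (out : List (String × List (String × Int))) : Decidable (Spec_group_by_owner_py all_clusters out) := by unfold Spec_group_by_owner_py; infer_instance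

-- ===== CLAIM (what is proved, stated in full; the proofs are below) =====
def Claim_equal_group_by_owner_py : Prop := ∀ (all_clusters : List ((List (String × List (String × String))) × String × String)), Dom_group_by_owner_py all_clusters → Pre_group_by_owner_py all_clusters → Spec_group_by_owner_py all_clusters (group_by_owner_py all_clusters)

-- ===== LEMMAS AND PROOFS =====

-- B's per-owner pair map: an owner's status list becomes its counts dict
def pvF : (String × List String) → (String × PySem.Dict String Int) := fun p => (p.1, pvCounts p.2)

-- A's intermediate owner_data, expressed from B's intermediate groups dict
def pvMapD (g : PySem.Dict String (List String)) : PySem.Dict String (PySem.Dict String Int) :=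
  PySem.Dict.mk (g.items.map pvF)

theorem pvGet?_mapD (l : List (String × List String)) (k : String) :
    (PySem.Dict.mk (l.map pvF)).get? k = ((PySem.Dict.mk l).get? k).map pvCounts := by
  induction l with
  | nil => rfl
  | cons a t ih =>
      obtain ⟨ak, av⟩ := a
      simp only [List.map_cons, pvF, PySem.Dict.get?_mk_cons]
      by_cases h : (ak == k) = true
      · rw [if_pos h, if_pos h]; rfl
      · rw [if_neg h, if_neg h]; exact ih

theorem pvContains_mapD (g : PySem.Dict String (List String)) (k : String) :
    (pvMapD g).contains k = g.contains k := by
  cases g with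
  | mk l =>
      simp only [pvMapD, PySem.Dict.contains_mk, List.any_map]
      rfl

theorem pvCounts_append (ss : List String) (s : String) :
    pvCounts (ss ++ [s]) = pvBump (pvCounts ss) s := by
  simp [pvCounts, List.foldl_append]

theorem pvStep_comm (g : PySem.Dict String (List String)) (hnd : g.keys.Nodup)
    (o s : String) :
    (pvMapD g).insert o (pvBump ((pvMapD g).getD o pvBase) s)
      = pvMapD (g.modify o [] (· ++ [s])) := by
  have hmod : g.modify o [] (· ++ [s]) = g.insert o (g.getD o [] ++ [s]) := rfl
  by_cases hc : g.contains o = true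
  · apply PySem.Dict.ext
    have hc' : (pvMapD g).contains o = true := by rw [pvContains_mapD]; exact hc
    rw [hmod]
    rw [PySem.Dict.items_insert_of_contains _ _ hc']
    rw [show (pvMapD (g.insert o (g.getD o [] ++ [s]))).items
        = (g.insert o (g.getD o [] ++ [s])).items.map pvF from rfl]
    rw [PySem.Dict.items_insert_of_contains _ _ hc]
    rw [show (pvMapD g).items = g.items.map pvF from rfl]
    rw [List.map_map, List.map_map]
    apply List.map_congr_left
    intro p hp
    by_cases hpk : p.1 = o
    · have hmem : (o, p.2) ∈ g.items := by
        rw [← hpk]; exact hp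
      have hgd : g.getD o [] = p.2 := PySem.Dict.getD_of_mem_items g hmem hnd []
      have hget : g.get? o = some p.2 := PySem.Dict.get?_of_mem_items g hmem hnd
      have hgdm : (pvMapD g).getD o pvBase = pvCounts p.2 := by
        rw [PySem.Dict.getD_eq_get?_getD]
        rw [show (pvMapD g).get? o = ((PySem.Dict.mk g.items).get? o).map pvCounts from
          pvGet?_mapD g.items o]
        rw [show (PySem.Dict.mk g.items) = g from rfl, hget]
        rfl
      simp only [Function.comp_apply, pvF, hpk, beq_self_eq_true, if_true, hgd, hgdm,
        pvCounts_append]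
    · have hbk : (p.1 == o) = false := by simp [hpk]
      simp only [Function.comp_apply, pvF, hbk, Bool.false_eq_true, if_false]
  · have hc0 : g.contains o = false := by simpa using hc
    have hc0' : (pvMapD g).contains o = false := by rw [pvContains_mapD]; exact hc0
    apply PySem.Dict.ext
    rw [hmod]
    rw [PySem.Dict.items_insert_of_not_contains _ _ hc0']
    rw [show (pvMapD (g.insert o (g.getD o [] ++ [s]))).items
        = (g.insert o (g.getD o [] ++ [s])).items.map pvF from rfl]
    rw [PySem.Dict.items_insert_of_not_contains _ _ hc0]
    rw [show (pvMapD g).items = g.items.map pvF from rfl, List.map_append]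
    rw [PySem.Dict.getD_of_not_contains _ pvBase hc0']
    rw [PySem.Dict.getD_of_not_contains g ([] : List String) hc0]
    rfl

-- A's fold state is always B's groups dict mapped through pvF
theorem pvFold_inv (l : List ((List (String × List (String × String))) × String × String)) :
    ∀ g : PySem.Dict String (List String), g.keys.Nodup →
    l.foldl (fun od c =>
      let owner := pvOwnerOf c.1
      let cur := od.getD owner pvBase
      let cur := cur.insert c.2.2 (cur.getD c.2.2 0 + 1)
      let cur := cur.insert "total" (cur.getD "total" 0 + 1)
      od.insert owner cur) (pvMapD g)
    = pvMapD (l.foldl (fun g c => g.modify (pvOwnerOf c.1) [] (· ++ [c.2.2])) g) := by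
  induction l with
  | nil => intro g _; rfl
  | cons c t ih =>
      intro g hnd
      have hstep : (pvMapD g).insert (pvOwnerOf c.1)
          (pvBump ((pvMapD g).getD (pvOwnerOf c.1) pvBase) c.2.2)
          = pvMapD (g.modify (pvOwnerOf c.1) [] (· ++ [c.2.2])) :=
        pvStep_comm g hnd (pvOwnerOf c.1) c.2.2
      have hnd' : (g.modify (pvOwnerOf c.1) [] (· ++ [c.2.2])).keys.Nodup := by
        have := PySem.Dict.nodup_keys_foldl_modify_key [c]
          (fun c => pvOwnerOf c.1) [] (fun _ c ss => ss ++ [c.2.2]) g hnd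
        simpa using this
      simp only [List.foldl_cons]
      rw [show ((pvMapD g).insert (pvOwnerOf c.1)
          (((pvMapD g).getD (pvOwnerOf c.1) pvBase).insert c.2.2
            (((pvMapD g).getD (pvOwnerOf c.1) pvBase).getD c.2.2 0 + 1) |>.insert "total"
            ((((pvMapD g).getD (pvOwnerOf c.1) pvBase).insert c.2.2
              (((pvMapD g).getD (pvOwnerOf c.1) pvBase).getD c.2.2 0 + 1)).getD "total" 0 + 1)))
          = pvMapD (g.modify (pvOwnerOf c.1) [] (· ++ [c.2.2])) from hstep]
      exact ih _ hnd'

-- ===== VERDICT (by name: the statement is the Claim_ definition above) =====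
theorem group_by_owner_py_spec : Claim_equal_group_by_owner_py := by
  intro l _ _
  unfold Spec_group_by_owner_py group_by_owner_py group_by_owner_py_alt
  set g := l.foldl (fun g c => g.modify (pvOwnerOf c.1) [] (· ++ [c.2.2])) PySem.Dict.empty with hg
  have hnd : g.keys.Nodup := by
    rw [hg]
    exact PySem.Dict.nodup_keys_foldl_modify_key l (fun c => pvOwnerOf c.1) []
      (fun _ c ss => ss ++ [c.2.2]) PySem.Dict.empty PySem.Dict.nodup_keys_empty
  have hA : l.foldl (fun od c =>
      let owner := pvOwnerOf c.1
      let cur := od.getD owner pvBase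
      let cur := cur.insert c.2.2 (cur.getD c.2.2 0 + 1)
      let cur := cur.insert "total" (cur.getD "total" 0 + 1)
      od.insert owner cur) PySem.Dict.empty = pvMapD g := by
    rw [hg]
    exact pvFold_inv l PySem.Dict.empty PySem.Dict.nodup_keys_empty
  have hB : (g.items.foldl (fun r p => r.insert p.1 (pvCounts p.2)) PySem.Dict.empty).items
      = g.items.map pvF := by
    have := PySem.Dict.items_foldl_insert_fresh g.items (fun p => p.1)
      (fun p => pvCounts p.2) PySem.Dict.empty
      (fun a _ => PySem.Dict.contains_empty _) (by exact hnd)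
    simpa [pvF] using this
  simp only [hA]
  rw [show (pvMapD g).items = g.items.map pvF from rfl, hB]
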